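-- pv_equiv track=rewrite | github.com/SonDo580/cli-games | 3-tic_tac_toe/main.py | check_northeast_southwest
-- ===== SOURCE A (Python) =====
-- SIZE = 3
--
-- def check_northeast_southwest(board, mark, row, col):
--     point = 0
--     i = row
--     j = col
--     while i > 0 and j < SIZE - 1:
--         i -= 1
--         j += 1
--         if board[i][j] == mark:
--             point += 1
--
--     i = row
--     j = col
--     while i < SIZE - 1 and j > 0:
--         i += 1
--         j -= 1
--         if board[i][j] == mark:
--             point += 1
--
--     return point + 1
-- ===== SOURCE B (Python) =====
-- SIZE = 3
--
-- def check_northeast_southwest(board, mark, row, col):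
--     s = row + col
--     point = 1
--     for i in range(SIZE):
--         j = s - i
--         if 0 <= j < SIZE and (i, j) != (row, col):
--             if board[i][j] == mark:
--                 point += 1
--     return point
-- ===== Notes on version B (the rewrite author's own statement) =====
-- stated objective: simpler
-- what changed: Replaces A's two outward-walking while loops (up-right then down-left) with a single forward scan over the anti-diagonal i + j = row + col, starting the count at 1 for the centre cell.
-- outside the precondition, e.g. on check_northeast_southwest([['m', '.', '.'], ['.', '.', '.'], ['m', '.', '.']], 'm', -2, 1): A returns 2, B returns 1; on check_northeast_southwest([['a', 'b'], ['c', 'd']], 'b', 1, 0): A returns 2, B returns 2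
import Mathlib
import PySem

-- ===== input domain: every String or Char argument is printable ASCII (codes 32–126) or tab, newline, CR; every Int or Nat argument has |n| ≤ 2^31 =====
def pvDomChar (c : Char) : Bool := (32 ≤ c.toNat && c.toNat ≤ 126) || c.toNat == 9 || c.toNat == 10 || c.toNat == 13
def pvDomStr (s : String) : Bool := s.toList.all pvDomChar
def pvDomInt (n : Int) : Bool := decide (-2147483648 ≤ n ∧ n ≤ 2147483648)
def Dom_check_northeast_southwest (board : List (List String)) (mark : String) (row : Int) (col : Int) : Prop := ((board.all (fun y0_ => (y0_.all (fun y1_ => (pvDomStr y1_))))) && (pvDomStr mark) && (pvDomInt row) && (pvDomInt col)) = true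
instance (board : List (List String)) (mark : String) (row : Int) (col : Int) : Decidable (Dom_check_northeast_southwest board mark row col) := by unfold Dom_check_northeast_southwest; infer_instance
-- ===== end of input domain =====

-- B replaces A's two outward-walking while loops with one forward scan of the anti-diagonal
-- i + j = row + col (simpler decomposition; same cost). Equivalence is on return values only.

-- ===== PORT A =====
-- first while loop of A: while i > 0 and j < SIZE - 1: i -= 1; j += 1; count
def pvNeLoop (board : List (List String)) (mark : String) (i j point : Int) : Int :=
  if 0 < i ∧ j < 3 - 1 then
    let i' := i - 1
    let j' := j + 1
    let point' :=
      if PySem.List.pyGet? ((PySem.List.pyGet? board i').getD []) j' = some mark then point + 1 else point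
    pvNeLoop board mark i' j' point'
  else point
termination_by i.toNat
decreasing_by omega

-- second while loop of A: while i < SIZE - 1 and j > 0: i += 1; j -= 1; count
def pvSwLoop (board : List (List String)) (mark : String) (i j point : Int) : Int :=
  if i < 3 - 1 ∧ 0 < j then
    let i' := i + 1
    let j' := j - 1
    let point' :=
      if PySem.List.pyGet? ((PySem.List.pyGet? board i').getD []) j' = some mark then point + 1 else point
    pvSwLoop board mark i' j' point'
  else point
termination_by j.toNat
decreasing_by omega

def check_northeast_southwest (board : List (List String)) (mark : String) (row : Int) (col : Int) : Int :=
  let p1 := pvNeLoop board mark row col 0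
  let p2 := pvSwLoop board mark row col p1
  p2 + 1

-- ===== PORT B =====
def check_northeast_southwest_alt (board : List (List String)) (mark : String) (row : Int) (col : Int) : Int :=
  let s := row + col
  (PySem.List.pyRange 0 3 1).foldl
    (fun point i =>
      let j := s - i
      if 0 ≤ j ∧ j < 3 ∧ ¬(i = row ∧ j = col) then
        if PySem.List.pyGet? ((PySem.List.pyGet? board i).getD []) j = some mark then point + 1 else point
      else point) 1

-- ===== PRECONDITION & SPEC =====
-- Pre_ restricts to the game's natural domain — a 3×3 board with 0 ≤ row, col < 3 — plus all inputs on
-- which neither walk ever starts (both programs return 1 there without touching the board); it excludes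
-- out-of-range coordinates whose value A obtains via negative-index wraparound or an IndexError, and
-- non-3×3 boards, on which A's hard-coded SIZE makes the result accidental.
def Pre_check_northeast_southwest (board : List (List String)) (mark : String) (row : Int) (col : Int) : Prop :=
  (board.length = 3 ∧ (∀ r ∈ board, r.length = 3) ∧ 0 ≤ row ∧ row < 3 ∧ 0 ≤ col ∧ col < 3)
  ∨ ((row ≤ 0 ∨ 2 ≤ col) ∧ (2 ≤ row ∨ col ≤ 0))
instance (board : List (List String)) (mark : String) (row : Int) (col : Int) : Decidable (Pre_check_northeast_southwest board mark row col) := by unfold Pre_check_northeast_southwest; infer_instance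

def pvWitness_check_northeast_southwest : List (List String) × String × Int × Int :=
  ([["x", "o", "x"], ["o", "x", "o"], ["x", "o", "x"]], "x", 1, 1)

def Spec_check_northeast_southwest (board : List (List String)) (mark : String) (row : Int) (col : Int) (out : Int) : Prop := out = check_northeast_southwest_alt board mark row col
instance (board : List (List String)) (mark : String) (row : Int) (col : Int) (out : Int) : Decidable (Spec_check_northeast_southwest board mark row col out) := by unfold Spec_check_northeast_southwest; infer_instance

-- ===== CLAIM (what is proved, stated in full; the proofs are below) =====
def Claim_equal_check_northeast_southwest : Prop := ∀ (board : List (List String)) (mark : String) (row : Int) (col : Int), Dom_check_northeast_southwest board mark row col → Pre_check_northeast_southwest board mark row col → Spec_check_northeast_southwest board mark row col (check_northeast_southwest board mark row col)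

-- ===== LEMMAS AND PROOFS =====

theorem pvNeLoop_stop (board : List (List String)) (mark : String) (i j point : Int)
    (h : ¬(0 < i ∧ j < 2)) : pvNeLoop board mark i j point = point := by
  rw [pvNeLoop]
  split_ifs with hc
  · exfalso; omega
  · rfl

theorem pvSwLoop_stop (board : List (List String)) (mark : String) (i j point : Int)
    (h : ¬(i < 2 ∧ 0 < j)) : pvSwLoop board mark i j point = point := by
  rw [pvSwLoop]
  split_ifs with hc
  · exfalso; omega
  · rfl

theorem pvNeLoop_step (board : List (List String)) (mark : String) (i j point : Int)
    (h1 : 0 < i) (h2 : j < 2) :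
    pvNeLoop board mark i j point =
      pvNeLoop board mark (i - 1) (j + 1)
        (if PySem.List.pyGet? ((PySem.List.pyGet? board (i - 1)).getD []) (j + 1) = some mark
         then point + 1 else point) := by
  rw [pvNeLoop, if_pos ⟨h1, by omega⟩]

theorem pvSwLoop_step (board : List (List String)) (mark : String) (i j point : Int)
    (h1 : i < 2) (h2 : 0 < j) :
    pvSwLoop board mark i j point =
      pvSwLoop board mark (i + 1) (j - 1)
        (if PySem.List.pyGet? ((PySem.List.pyGet? board (i + 1)).getD []) (j - 1) = some mark
         then point + 1 else point) := by
  rw [pvSwLoop, if_pos ⟨by omega, h2⟩]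

theorem pvTriple {α : Type} (l : List α) (h : l.length = 3) : ∃ a b c, l = [a, b, c] := by
  rcases l with _ | ⟨a, _ | ⟨b, _ | ⟨c, _ | ⟨d, t⟩⟩⟩⟩ <;> simp_all

theorem pvRange03 : PySem.List.pyRange 0 3 1 = [0, 1, 2] := by decide

-- ===== VERDICT (by name: the statement is the Claim_ definition above) =====
set_option maxRecDepth 40000 in
theorem check_northeast_southwest_spec : Claim_equal_check_northeast_southwest := by
  intro board mark row col _ hp
  unfold Spec_check_northeast_southwest
  rcases hp with ⟨hb, hrows, h0r, hr3, h0c, hc3⟩ | ⟨h1, h2⟩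
  · obtain ⟨r0, r1, r2, rfl⟩ := pvTriple board hb
    obtain ⟨a0, a1, a2, rfl⟩ := pvTriple r0 (hrows _ (by simp))
    obtain ⟨b0, b1, b2, rfl⟩ := pvTriple r1 (hrows _ (by simp))
    obtain ⟨c0, c1, c2, rfl⟩ := pvTriple r2 (hrows _ (by simp))
    interval_cases row <;> interval_cases col <;>
      norm_num [check_northeast_southwest, check_northeast_southwest_alt,
        pvNeLoop_step, pvNeLoop_stop, pvSwLoop_step, pvSwLoop_stop,
        pvRange03, List.foldl, PySem.List.pyGet?, PySem.List.pyIdx?] <;>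
      split_ifs <;> omega
  · rw [check_northeast_southwest,
      pvNeLoop_stop _ _ _ _ _ (by omega), pvSwLoop_stop _ _ _ _ _ (by omega),
      check_northeast_southwest_alt, pvRange03]
    simp only [List.foldl]
    split_ifs <;> omega
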